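-- pv_equiv track=rewrite | github.com/feliixism/feasel-net | utils/syntax.py | del_internal_kwargs
-- ===== SOURCE A (Python) =====
-- def del_internal_kwargs(kwargs):
--     while True:
--         c = 0
--         for key in kwargs:
--             if key[0] == "_":
--                 kwargs.remove(key)
--                 c += 1
--         if c == 0:
--             break
--     return kwargs
-- ===== SOURCE B (Python) =====
-- def del_internal_kwargs(kwargs):
--     # single-pass in-place two-pointer compaction; same list object mutated and returned
--     i = 0
--     for key in kwargs:
--         if not key.startswith("_"):
--             kwargs[i] = key
--             i += 1
--     del kwargs[i:]
--     return kwargs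
-- ===== Notes on version B (the rewrite author's own statement) =====
-- stated objective: alternative
-- what changed: Replaced A's fixed-point rescanning (a for-loop calling list.remove, repeated until a scan removes nothing) by a single in-place two-pointer compaction pass over the same list.
-- outside the precondition, e.g. on del_internal_kwargs(['']): A raises IndexError, B returns ['']
import Mathlib
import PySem

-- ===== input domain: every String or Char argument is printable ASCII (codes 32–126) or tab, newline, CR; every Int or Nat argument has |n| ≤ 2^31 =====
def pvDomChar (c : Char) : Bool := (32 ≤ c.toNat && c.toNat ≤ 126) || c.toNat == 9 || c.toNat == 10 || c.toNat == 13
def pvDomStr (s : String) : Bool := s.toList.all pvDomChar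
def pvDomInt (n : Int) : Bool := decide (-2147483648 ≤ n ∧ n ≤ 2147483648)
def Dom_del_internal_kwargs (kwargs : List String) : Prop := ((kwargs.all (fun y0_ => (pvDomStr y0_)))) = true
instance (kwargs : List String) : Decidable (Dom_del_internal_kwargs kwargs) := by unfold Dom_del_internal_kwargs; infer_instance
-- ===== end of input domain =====

-- B replaces A's repeated fixed-point rescans (list.remove inside a for-loop, redone until no
-- removal happens) by one in-place two-pointer compaction pass; equivalence is about the return
-- value (both programs mutate kwargs to the same final contents and return it).

-- ===== PORT A =====
-- inner 'for key in kwargs' pass: Python iterates by index over the (mutating) list;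
-- kwargs.remove(key) erases the first occurrence of key. key[0] on "" raises (excluded by Pre_);
-- the port falls through to the no-removal branch there. 'fuel' only makes the loop total:
-- each step strictly decreases l.length - i, so fuel = length + 1 never runs out.
def aPass : Nat → List String → Nat → Nat → List String × Nat
  | 0, l, _, c => (l, c)
  | fuel + 1, l, i, c =>
    if h : i < l.length then
      if PySem.Str.pyGet? l[i] 0 = some '_' then
        aPass fuel (l.erase l[i]) (i + 1) (c + 1)
      else
        aPass fuel l (i + 1) c
    else (l, c)

-- outer 'while True' loop: repeat the pass until it removed nothing (c == 0);
-- each repeated pass shortens the list, so fuel = length + 1 never runs out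
def aLoop : Nat → List String → List String
  | 0, l => l
  | fuel + 1, l =>
    if (aPass (l.length + 1) l 0 0).2 = 0 then (aPass (l.length + 1) l 0 0).1
    else aLoop fuel (aPass (l.length + 1) l 0 0).1

def del_internal_kwargs (kwargs : List String) : List String :=
  aLoop (kwargs.length + 1) kwargs

-- ===== PORT B =====
-- single compaction pass: read index j walks the list, write index i receives the kept keys;
-- 'del kwargs[i:]' at the end is the final 'take i' (fuel = length + 1 never runs out)
def bLoop : Nat → List String → Nat → Nat → List String × Nat
  | 0, l, i, _ => (l, i)
  | fuel + 1, l, i, j =>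
    if h : j < l.length then
      if PySem.Str.startswith l[j] "_" then
        bLoop fuel l i (j + 1)
      else
        bLoop fuel (l.set i l[j]) (i + 1) (j + 1)
    else (l, i)

def del_internal_kwargs_alt (kwargs : List String) : List String :=
  ((bLoop (kwargs.length + 1) kwargs 0 0).1).take (bLoop (kwargs.length + 1) kwargs 0 0).2

-- ===== PRECONDITION & SPEC =====
-- Pre_ excludes lists containing the empty string: Python A raises IndexError on key[0] there.
def Pre_del_internal_kwargs (kwargs : List String) : Prop := "" ∉ kwargs
instance (kwargs : List String) : Decidable (Pre_del_internal_kwargs kwargs) := by unfold Pre_del_internal_kwargs; infer_instance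

def pvWitness_del_internal_kwargs : List String := ["_a", "b", "_c", "d"]

def Spec_del_internal_kwargs (kwargs : List String) (out : List String) : Prop := out = del_internal_kwargs_alt kwargs
instance (kwargs : List String) (out : List String) : Decidable (Spec_del_internal_kwargs kwargs out) := by unfold Spec_del_internal_kwargs; infer_instance

-- ===== CLAIM (what is proved, stated in full; the proofs are below) =====
def Claim_equal_del_internal_kwargs : Prop := ∀ (kwargs : List String), Dom_del_internal_kwargs kwargs → Pre_del_internal_kwargs kwargs → Spec_del_internal_kwargs kwargs (del_internal_kwargs kwargs)

-- ===== LEMMAS AND PROOFS =====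
-- the kept-key predicate; on every string it agrees with both ports' tests
def keep (s : String) : Bool := ! PySem.Str.startswith s "_"

theorem head_underscore_iff (s : String) :
    (PySem.Str.pyGet? s 0 = some '_') ↔ PySem.Str.startswith s "_" = true := by
  rw [PySem.Str.startswith_eq, PySem.Chars.startswith_iff]
  rw [show PySem.Str.pyGet? s 0 = PySem.List.pyGet? s.toList 0 from by simp [PySem.Str.pyGet?]]
  cases s.toList with
  | nil => simp [PySem.List.pyGet?]
  | cons a t =>
    rw [PySem.List.pyGet?_zero_cons]
    constructor
    · rintro h; simp at h; subst h; exact ⟨t, rfl⟩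
    · rintro ⟨u, hu⟩; simp at hu; simp [hu.1.symm]

theorem keep_eq_false_iff (s : String) :
    keep s = false ↔ PySem.Str.pyGet? s 0 = some '_' := by
  rw [head_underscore_iff]
  simp [keep]

theorem filter_erase_of_not_keep {a : String} {l : List String}
    (hk : keep a = false) : (l.erase a).filter keep = l.filter keep := by
  induction l with
  | nil => simp
  | cons x xs ih =>
    by_cases hx : x = a
    · subst hx
      simp [List.erase_cons_head, hk]
    · rw [List.erase_cons_tail (by simp [hx])]
      simp [List.filter_cons, ih]

-- a pass only ever removes elements: it returns at least as many removals and a list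
-- shorter by exactly the removals it counted
theorem aPass_count_length (fuel : Nat) (l : List String) (i c : Nat) (hf : l.length - i < fuel) :
    c ≤ (aPass fuel l i c).2 ∧ (aPass fuel l i c).1.length + ((aPass fuel l i c).2 - c) = l.length := by
  induction fuel generalizing l i c with
  | zero => omega
  | succ fuel ih =>
    rw [aPass]
    by_cases h : i < l.length
    · rw [dif_pos h]
      by_cases hu : PySem.Str.pyGet? l[i] 0 = some '_'
      · rw [if_pos hu]
        have hl : (l.erase l[i]).length = l.length - 1 :=
          List.length_erase_of_mem (List.getElem_mem h)
        have := ih (l.erase l[i]) (i + 1) (c + 1) (by omega)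
        omega
      · rw [if_neg hu]
        have := ih l (i + 1) c (by omega)
        omega
    · rw [dif_neg h]
      simp

-- one pass preserves the kept keys
theorem aPass_filter (fuel : Nat) (l : List String) (i c : Nat) (hf : l.length - i < fuel) :
    (aPass fuel l i c).1.filter keep = l.filter keep := by
  induction fuel generalizing l i c with
  | zero => omega
  | succ fuel ih =>
    rw [aPass]
    by_cases h : i < l.length
    · rw [dif_pos h]
      by_cases hu : PySem.Str.pyGet? l[i] 0 = some '_'
      · rw [if_pos hu]
        have hk : keep l[i] = false := (keep_eq_false_iff _).mpr hu
        have hl : (l.erase l[i]).length = l.length - 1 :=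
          List.length_erase_of_mem (List.getElem_mem h)
        rw [ih (l.erase l[i]) (i + 1) (c + 1) (by omega), filter_erase_of_not_keep hk]
      · rw [if_neg hu]
        exact ih l (i + 1) c (by omega)
    · rw [dif_neg h]

-- a pass that removed nothing changed nothing, and every key it scanned is kept
theorem aPass_fix (fuel : Nat) (l : List String) (i c : Nat) (hf : l.length - i < fuel)
    (hc : (aPass fuel l i c).2 = c) :
    (aPass fuel l i c).1 = l ∧ ∀ s ∈ l.drop i, keep s = true := by
  induction fuel generalizing l i c with
  | zero => omega
  | succ fuel ih =>
    rw [aPass] at hc ⊢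
    by_cases h : i < l.length
    · rw [dif_pos h] at hc ⊢
      by_cases hu : PySem.Str.pyGet? l[i] 0 = some '_'
      · exfalso
        rw [if_pos hu] at hc
        have hl : (l.erase l[i]).length = l.length - 1 :=
          List.length_erase_of_mem (List.getElem_mem h)
        have := (aPass_count_length fuel (l.erase l[i]) (i + 1) (c + 1) (by omega)).1
        omega
      · rw [if_neg hu] at hc ⊢
        obtain ⟨h1, h2⟩ := ih l (i + 1) c (by omega) hc
        refine ⟨h1, ?_⟩
        rw [List.drop_eq_getElem_cons h]
        intro s hs
        rcases List.mem_cons.mp hs with hs | hs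
        · subst hs
          cases hk : keep l[i] with
          | true => rfl
          | false => exact absurd ((keep_eq_false_iff _).mp hk) hu
        · exact h2 s hs
    · rw [dif_neg h] at hc ⊢
      exact ⟨rfl, by simp [List.drop_eq_nil_of_le (by omega : l.length ≤ i)]⟩

-- the outer loop computes the filter
theorem aLoop_eq_filter (fuel : Nat) (l : List String) (hn : l.length < fuel) :
    aLoop fuel l = l.filter keep := by
  induction fuel generalizing l with
  | zero => omega
  | succ fuel ih =>
    rw [aLoop]
    by_cases hc : (aPass (l.length + 1) l 0 0).2 = 0
    · rw [if_pos hc]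
      obtain ⟨h1, h2⟩ := aPass_fix (l.length + 1) l 0 0 (by omega) hc
      rw [h1]
      exact (List.filter_eq_self.mpr (by simpa using h2)).symm
    · rw [if_neg hc]
      have hlen := aPass_count_length (l.length + 1) l 0 0 (by omega)
      rw [ih _ (by omega), aPass_filter (l.length + 1) l 0 0 (by omega)]

-- the compaction invariant for B's pass
theorem bLoop_invariant (fuel : Nat) (l : List String) (i j : Nat) (hij : i ≤ j)
    (hf : l.length - j < fuel) :
    ((bLoop fuel l i j).1).take (bLoop fuel l i j).2 = l.take i ++ (l.drop j).filter keep := by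
  induction fuel generalizing l i j with
  | zero => omega
  | succ fuel ih =>
    rw [bLoop]
    by_cases h : j < l.length
    · rw [dif_pos h]
      by_cases hu : PySem.Str.startswith l[j] "_" = true
      · rw [if_pos hu]
        have hk : keep l[j] = false := by simp only [keep, hu, Bool.not_true]
        rw [ih l i (j + 1) (by omega) (by omega)]
        rw [List.drop_eq_getElem_cons h, List.filter_cons, hk]
        simp
      · rw [if_neg hu]
        have hi : i < l.length := by omega
        have hu' : PySem.Str.startswith l[j] "_" = false := by
          revert hu; cases PySem.Str.startswith l[j] "_" <;> simp
        have hk : keep l[j] = true := by simp only [keep, hu', Bool.not_false]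
        rw [ih (l.set i l[j]) (i + 1) (j + 1) (by omega) (by simp; omega)]
        have hset_drop : (l.set i l[j]).drop (j + 1) = l.drop (j + 1) := by
          rw [List.drop_set]
          simp
          omega
        have hset_take : (l.set i l[j]).take (i + 1) = l.take i ++ [l[j]] := by
          rw [List.take_add_one, List.take_set, List.set_eq_of_length_le (by simp)]
          simp [hi]
        rw [hset_drop, hset_take]
        rw [List.drop_eq_getElem_cons h, List.filter_cons, hk]
        simp
    · rw [dif_neg h]
      simp [List.drop_eq_nil_of_le (by omega : l.length ≤ j)]

theorem alt_eq_filter (l : List String) : del_internal_kwargs_alt l = l.filter keep := by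
  have := bLoop_invariant (l.length + 1) l 0 0 (Nat.le_refl 0) (by omega)
  simpa [del_internal_kwargs_alt] using this

-- ===== VERDICT (by name: the statement is the Claim_ definition above) =====
theorem del_internal_kwargs_spec : Claim_equal_del_internal_kwargs := by
  intro kwargs _ _
  unfold Spec_del_internal_kwargs del_internal_kwargs
  rw [aLoop_eq_filter (kwargs.length + 1) kwargs (by omega), alt_eq_filter]
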